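-- pv_equiv track=rewrite | github.com/SHINE-six/HireSight | backend/eye_tracking.py | analyze_blinks
-- ===== SOURCE A (Python) =====
-- def analyze_blinks(blink_timestamps, duration=5, threshold=3):
--     high_freq_blinks = 0
--     start_index = 0
--
--     while start_index < len(blink_timestamps):
--         end_index = start_index
--         while end_index < len(blink_timestamps) and blink_timestamps[end_index] - blink_timestamps[start_index] <= duration:
--             end_index += 1
--
--         if (end_index - start_index) >= threshold:
--             high_freq_blinks += 1
--             start_index = end_index  # Skip to the next set of blinks
--         else:
--             start_index += 1
--
--     return high_freq_blinks
-- ===== SOURCE B (Python) =====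
-- def analyze_blinks(blink_timestamps, duration=5, threshold=3):
--     # Backward dynamic programming over suffixes: counts[j] is the number of
--     # high-frequency windows found when scanning the suffix of length j.
--     counts = [0]
--     n = len(blink_timestamps)
--     for i in range(n - 1, -1, -1):
--         t = blink_timestamps[i]
--         w = 0
--         for x in blink_timestamps[i:]:
--             if x - t > duration:
--                 break
--             w += 1
--         k = n - i
--         counts.append(counts[k - w] + 1 if w >= threshold else counts[k - 1])
--     return counts[n]
-- ===== Notes on version B (the rewrite author's own statement) =====
-- stated objective: alternative
-- what changed: Replaces A's forward greedy while-loop with index jumps by a backward dynamic-programming pass that tabulates the answer for every suffix (counts[j] = windows found in the suffix of length j) and reads off the full-list entry.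
import Mathlib
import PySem

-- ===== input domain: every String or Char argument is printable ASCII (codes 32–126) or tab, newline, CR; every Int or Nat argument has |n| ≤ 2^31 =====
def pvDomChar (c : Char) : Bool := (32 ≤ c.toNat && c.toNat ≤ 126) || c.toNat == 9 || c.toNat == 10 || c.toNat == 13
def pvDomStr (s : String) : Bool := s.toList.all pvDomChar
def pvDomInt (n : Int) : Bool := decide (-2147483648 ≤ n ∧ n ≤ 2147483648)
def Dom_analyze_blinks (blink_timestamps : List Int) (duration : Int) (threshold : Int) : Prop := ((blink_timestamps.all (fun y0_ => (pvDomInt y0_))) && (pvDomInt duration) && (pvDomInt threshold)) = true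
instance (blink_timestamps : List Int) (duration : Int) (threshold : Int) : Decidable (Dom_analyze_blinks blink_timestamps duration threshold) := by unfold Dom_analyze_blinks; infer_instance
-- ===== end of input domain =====

-- B replaces A's forward greedy while-loop (index jumps) by a backward dynamic-programming
-- table over suffixes; same worst-case cost, objective: alternative. Return values only
-- (neither program mutates its arguments).

-- ===== PORT A =====
-- inner while loop: end_index advances while in range and within duration of ts[base]
def pvFindEnd (ts : List Int) (d : Int) (base : Nat) (e : Nat) : Nat :=
  if h : e < ts.length ∧ ts.getD e 0 - ts.getD base 0 ≤ d then
    pvFindEnd ts d base (e + 1)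
  else e
termination_by ts.length - e
decreasing_by exact Nat.sub_lt_sub_left h.1 (Nat.lt_succ_self e)

-- outer while loop. On the inputs excluded by Pre_ (nonempty list, duration < 0,
-- threshold ≤ 0) the Python loop repeats start_index = end_index = start_index forever;
-- there (and only there) the port advances to start+1 via `max` so it stays total.
def pvLoopA (ts : List Int) (d : Int) (th : Int) (acc : Int) (start : Nat) : Int :=
  if start < ts.length then
    let e := pvFindEnd ts d start start
    if (e : Int) - (start : Int) ≥ th then
      pvLoopA ts d th (acc + 1) (max e (start + 1))
    else
      pvLoopA ts d th acc (start + 1)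
  else acc
termination_by ts.length - start
decreasing_by
  · have := Nat.le_max_right (pvFindEnd ts d start start) (start + 1)
    omega
  · omega

def analyze_blinks (blink_timestamps : List Int) (duration : Int) (threshold : Int) : Int :=
  pvLoopA blink_timestamps duration threshold 0 0

-- ===== PORT B =====
-- length of the inner for-loop's window: scan the suffix until x - t > duration
def pvWindowLen (d t : Int) : List Int → Nat
  | [] => 0
  | x :: xs => if x - t > d then 0 else pvWindowLen d t xs + 1

-- the counts table, newest entry first: (pvTables d th l).getD j 0 is Python's
-- counts[l.length - j], the answer for the suffix l.drop j
def pvTables (d th : Int) : List Int → List Int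
  | [] => [0]
  | t :: rest =>
    let prev := pvTables d th rest
    let w := pvWindowLen d t (t :: rest)
    (if (w : Int) ≥ th then prev.getD (w - 1) 0 + 1 else prev.getD 0 0) :: prev

def analyze_blinks_alt (blink_timestamps : List Int) (duration : Int) (threshold : Int) : Int :=
  (pvTables duration threshold blink_timestamps).getD 0 0

-- ===== PRECONDITION & SPEC =====
-- Pre_ excludes exactly the inputs where Python A loops forever (never returns):
-- a nonempty list with duration < 0 and threshold ≤ 0 makes start_index = end_index repeat.
def Pre_analyze_blinks (blink_timestamps : List Int) (duration : Int) (threshold : Int) : Prop :=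
  blink_timestamps = [] ∨ 0 ≤ duration ∨ 1 ≤ threshold
instance (blink_timestamps : List Int) (duration : Int) (threshold : Int) : Decidable (Pre_analyze_blinks blink_timestamps duration threshold) := by unfold Pre_analyze_blinks; infer_instance

def pvWitness_analyze_blinks : List Int × Int × Int := ([0, 1, 2, 10], 5, 3)

def Spec_analyze_blinks (blink_timestamps : List Int) (duration : Int) (threshold : Int) (out : Int) : Prop := out = analyze_blinks_alt blink_timestamps duration threshold
instance (blink_timestamps : List Int) (duration : Int) (threshold : Int) (out : Int) : Decidable (Spec_analyze_blinks blink_timestamps duration threshold out) := by unfold Spec_analyze_blinks; infer_instance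

-- ===== CLAIM (what is proved, stated in full; the proofs are below) =====
def Claim_equal_analyze_blinks : Prop := ∀ (blink_timestamps : List Int) (duration : Int) (threshold : Int), Dom_analyze_blinks blink_timestamps duration threshold → Pre_analyze_blinks blink_timestamps duration threshold → Spec_analyze_blinks blink_timestamps duration threshold (analyze_blinks blink_timestamps duration threshold)

-- ===== LEMMAS AND PROOFS =====

-- proof-side characterisation of the common value: the answer for a suffix
def pvF (d th : Int) : List Int → Int
  | [] => 0
  | t :: rest =>
    let w := pvWindowLen d t (t :: rest)
    if (w : Int) ≥ th then pvF d th (rest.drop (w - 1)) + 1 else pvF d th rest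
termination_by l => l.length
decreasing_by
  all_goals simp

lemma pvF_nil (d th : Int) : pvF d th [] = 0 := by rw [pvF]

lemma pvF_cons (d th t : Int) (rest : List Int) :
    pvF d th (t :: rest) =
      if (pvWindowLen d t (t :: rest) : Int) ≥ th
      then pvF d th (rest.drop (pvWindowLen d t (t :: rest) - 1)) + 1
      else pvF d th rest := by rw [pvF]

lemma pvTables_getD (d th : Int) (xs : List Int) :
    ∀ j, (pvTables d th xs).getD j 0 = pvF d th (xs.drop j) := by
  induction xs with
  | nil => intro j; cases j <;> simp [pvTables, pvF_nil]
  | cons t rest ih =>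
    intro j
    cases j with
    | zero =>
      simp only [pvTables, List.getD_cons_zero, List.drop_zero]
      rw [pvF_cons, ih, ih]
      split <;> simp
    | succ j =>
      simp only [pvTables, List.getD_cons_succ, List.drop_succ_cons]
      exact ih j

lemma pvFindEnd_eq (ts : List Int) (d : Int) (base : Nat) :
    ∀ k e, ts.length - e ≤ k →
      pvFindEnd ts d base e = e + pvWindowLen d (ts.getD base 0) (ts.drop e) := by
  intro k
  induction k with
  | zero =>
    intro e he
    have hlen : ts.length ≤ e := by omega
    rw [pvFindEnd, List.drop_eq_nil_of_le hlen]
    simp [pvWindowLen]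
    omega
  | succ k ih =>
    intro e he
    rw [pvFindEnd]
    by_cases hlt : e < ts.length
    · have hdrop : ts.drop e = ts[e] :: ts.drop (e + 1) := List.drop_eq_getElem_cons hlt
      have hgd : ts.getD e 0 = ts[e] := List.getD_eq_getElem ts 0 hlt
      rw [hdrop]
      by_cases hc : ts.getD e 0 - ts.getD base 0 ≤ d
      · rw [dif_pos ⟨hlt, hc⟩, ih (e + 1) (by omega)]
        simp only [pvWindowLen]
        rw [if_neg (by rw [← hgd]; omega)]
        omega
      · rw [dif_neg (by tauto)]
        simp only [pvWindowLen]
        rw [if_pos (by rw [← hgd]; omega)]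
        omega
    · rw [dif_neg (by tauto), List.drop_eq_nil_of_le (by omega)]
      simp [pvWindowLen]

lemma pvLoopA_eq (ts : List Int) (d th : Int)
    (hpre : Pre_analyze_blinks ts d th) :
    ∀ k start acc, ts.length - start ≤ k →
      pvLoopA ts d th acc start = acc + pvF d th (ts.drop start) := by
  intro k
  induction k with
  | zero =>
    intro start acc h
    rw [pvLoopA, if_neg (by omega), List.drop_eq_nil_of_le (by omega)]
    simp [pvF_nil]
  | succ k ih =>
    intro start acc h
    rw [pvLoopA]
    by_cases hlt : start < ts.length
    · rw [if_pos hlt]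
      have hdrop : ts.drop start = ts[start] :: ts.drop (start + 1) :=
        List.drop_eq_getElem_cons hlt
      have hgd : ts.getD start 0 = ts[start] := List.getD_eq_getElem ts 0 hlt
      set w := pvWindowLen d (ts.getD start 0) (ts.drop start) with hw
      have hfe : pvFindEnd ts d start start = start + w :=
        pvFindEnd_eq ts d start (ts.length - start) start (le_refl _)
      have hwD : pvWindowLen d ts[start] (ts[start] :: ts.drop (start + 1)) = w := by
        rw [hw, hdrop, hgd]
      have hF : pvF d th (ts.drop start) =
          if (w : Int) ≥ th then pvF d th ((ts.drop (start + 1)).drop (w - 1)) + 1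
          else pvF d th (ts.drop (start + 1)) := by
        rw [hdrop, pvF_cons, hwD]
      simp only [hfe]
      by_cases hth : (w : Int) ≥ th
      · rw [if_pos (by push_cast; omega)]
        -- under Pre_, the taken branch implies w ≥ 1
        have hw1 : 1 ≤ w := by
          rcases hpre with hnil | hd | hth1
          · exfalso; rw [hnil] at hlt; simp at hlt
          · have : pvWindowLen d ts[start] (ts[start] :: ts.drop (start + 1)) =
                pvWindowLen d ts[start] (ts.drop (start + 1)) + 1 := by
              simp only [pvWindowLen]; rw [if_neg (by omega)]
            omega
          · omega
        have hmax : max (start + w) (start + 1) = start + w := by omega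
        rw [hmax, ih (start + w) (acc + 1) (by omega), hF, if_pos hth]
        rw [List.drop_drop]
        have : start + 1 + (w - 1) = start + w := by omega
        rw [this]; omega
      · rw [if_neg (by push_cast at hth ⊢; omega), ih (start + 1) acc (by omega), hF,
          if_neg hth]
    · rw [if_neg hlt, List.drop_eq_nil_of_le (by omega)]
      simp [pvF_nil]

-- ===== VERDICT (by name: the statement is the Claim_ definition above) =====
theorem analyze_blinks_spec : Claim_equal_analyze_blinks := by
  intro ts d th _ hpre
  unfold Spec_analyze_blinks analyze_blinks analyze_blinks_alt
  rw [pvLoopA_eq ts d th hpre ts.length 0 0 (by omega), pvTables_getD]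
  simp
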